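-- pv_equiv track=rewrite | github.com/yugsharma1711/DS-ALGO | Greedy_Algorithm/candy_shopping.py | candyStore
-- ===== SOURCE A (Python) =====
-- def candyStore(candy,N,k):
--         candy.sort()
--         cost = 0
--         low = 0
--         high = len(candy) - 1
--         while low <= high:
--             cost += candy[low]
--             for i in range(k):
--                 high-=1
--             low += 1
--         _cost = 0
--         low = 0
--         high = len(candy)-1
--         candy.reverse()
--         while low <= high:
--             _cost += candy[low]
--             for i in range(k):
--                 high-=1
--             low += 1
--         return [cost, _cost]
-- ===== SOURCE B (Python) =====
-- def candyStore(candy, N, k):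
--     # One purchase covers the bought candy plus k free ones, so we pay for
--     # ceil(n/(k+1)) candies: the cheapest ones for the minimum cost, the
--     # dearest ones for the maximum cost.
--     s = sorted(candy)
--     n = len(s)
--     m = (n - 1) // (k + 1) + 1
--     return [sum(s[:m]), sum(s[n - m:])]
-- ===== Notes on version B (the rewrite author's own statement) =====
-- stated objective: faster
-- what changed: Replaced the two two-pointer while-loops (with an inner for-loop decrementing the high pointer k times per step) by a closed-form pay-count m = ceil(n/(k+1)) and two slice sums over the sorted list; Pre_ excludes negative k (a negative free-candy count is outside the task's natural domain), where B's group size k+1 is meaningless (division by zero at k = -1); A also sorts candy in place (leaving it descending) while B does not mutate it.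
-- outside the precondition, e.g. on candyStore([1, 2, 3], 3, -1): A returns [6, 6], B raises ZeroDivisionError; on candyStore([1, 2, 3], 3, -2): A returns [6, 6], B returns [3, 0]
import Mathlib
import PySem

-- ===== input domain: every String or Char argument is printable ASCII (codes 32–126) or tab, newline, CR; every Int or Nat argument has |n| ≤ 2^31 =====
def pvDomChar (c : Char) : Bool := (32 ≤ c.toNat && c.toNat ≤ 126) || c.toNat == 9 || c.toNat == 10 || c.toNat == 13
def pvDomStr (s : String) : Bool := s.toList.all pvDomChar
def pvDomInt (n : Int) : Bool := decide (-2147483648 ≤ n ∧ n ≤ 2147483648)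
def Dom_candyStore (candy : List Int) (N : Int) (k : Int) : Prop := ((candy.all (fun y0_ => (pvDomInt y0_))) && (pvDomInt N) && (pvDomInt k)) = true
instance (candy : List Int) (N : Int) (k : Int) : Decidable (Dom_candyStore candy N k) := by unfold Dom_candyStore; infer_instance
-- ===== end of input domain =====

-- B replaces A's two pointer-walking while-loops by a closed-form pay-count and two slice
-- sums over the sorted list (objective: faster).  A sorts `candy` in place and leaves it
-- reversed (descending); B does not mutate its argument: the equivalence proved here is
-- about the RETURN value only.

-- ===== PORT A =====
-- the inner 'for i in range(k): high -= 1'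
def candyAInner (k high : Int) : Int :=
  (PySem.List.pyRange 0 k 1).foldl (fun h _ => h - 1) high

-- cited by the port's termination proof
theorem candyAInner_le (k high : Int) : candyAInner k high ≤ high := by
  unfold candyAInner
  have h : ∀ (l : List Int) (a : Int), l.foldl (fun h _ => h - 1) a = a - l.length := by
    intro l
    induction l with
    | nil => simp
    | cons x t ih => intro a; simp [List.foldl, ih]; omega
  rw [h]; omega

-- the 'while low <= high' loop of A
def candyALoop (xs : List Int) (k : Int) (cost low high : Int) : Int :=
  if low ≤ high then
    candyALoop xs k (cost + PySem.List.pyGetD xs low 0) (low + 1) (candyAInner k high)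
  else cost
termination_by (high - low + 1).toNat
decreasing_by
  have := candyAInner_le k high
  omega

def candyStore (candy : List Int) (N : Int) (k : Int) : List Int :=
  let s := PySem.List.sorted candy (fun x => x) false
  let cost := candyALoop s k 0 0 (PySem.List.len s - 1)
  let r := s.reverse
  let cost2 := candyALoop r k 0 0 (PySem.List.len r - 1)
  [cost, cost2]

-- ===== PORT B =====
def candyStore_alt (candy : List Int) (N : Int) (k : Int) : List Int :=
  let s := PySem.List.sorted candy (fun x => x) false
  let n : Int := PySem.List.len s
  let m : Int := PySem.Int.floordiv (n - 1) (k + 1) + 1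
  [(PySem.List.slice s none (some m)).sum, (PySem.List.slice s (some (n - m)) none).sum]

-- ===== PRECONDITION & SPEC =====
-- Pre_ excludes negative k: a negative free-candy count is outside the task's natural
-- domain, and B's group size k+1 is meaningless there (division by zero at k = -1).
def Pre_candyStore (candy : List Int) (N : Int) (k : Int) : Prop := 0 ≤ k
instance (candy : List Int) (N : Int) (k : Int) : Decidable (Pre_candyStore candy N k) := by unfold Pre_candyStore; infer_instance
def pvWitness_candyStore : List Int × Int × Int := ([1, 5, 2], 3, 1)

def Spec_candyStore (candy : List Int) (N : Int) (k : Int) (out : List Int) : Prop := out = candyStore_alt candy N k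
instance (candy : List Int) (N : Int) (k : Int) (out : List Int) : Decidable (Spec_candyStore candy N k out) := by unfold Spec_candyStore; infer_instance

-- ===== CLAIM (what is proved, stated in full; the proofs are below) =====
def Claim_equal_candyStore : Prop := ∀ (candy : List Int) (N : Int) (k : Int), Dom_candyStore candy N k → Pre_candyStore candy N k → Spec_candyStore candy N k (candyStore candy N k)

-- ===== LEMMAS AND PROOFS =====

-- number of iterations of A's loop, as a function of h - low
def cnt (k e : Int) : Nat := if 0 ≤ e then e.toNat / (k.toNat + 1) + 1 else 0

theorem candyAInner_eq (k high : Int) : candyAInner k high = high - k.toNat := by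
  unfold candyAInner
  have h : ∀ (l : List Int) (a : Int), l.foldl (fun h _ => h - 1) a = a - l.length := by
    intro l
    induction l with
    | nil => simp
    | cons x t ih => intro a; simp [List.foldl, ih]; omega
  rw [h, PySem.List.length_pyRange_one]
  simp

theorem cnt_step (k e : Int) (he : 0 ≤ e) :
    cnt k e = cnt k (e - k.toNat - 1) + 1 := by
  unfold cnt
  by_cases h : 0 ≤ e - k.toNat - 1
  · simp only [he, h, if_true]
    have : e.toNat = (e - ↑k.toNat - 1).toNat + (k.toNat + 1) := by omega
    rw [this, Nat.add_div_right _ (by omega)]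
  · simp only [he, h, if_true, if_false]
    have : e.toNat < k.toNat + 1 := by omega
    rw [Nat.div_eq_of_lt this]

theorem candyALoop_eq (d : Nat) : ∀ (xs : List Int) (k c j h : Int), 0 ≤ j →
    h < xs.length → (h - j + 1).toNat ≤ d →
    candyALoop xs k c j h = c + ((xs.drop j.toNat).take (cnt k (h - j))).sum := by
  induction d with
  | zero =>
    intro xs k c j h hj hh hd
    rw [candyALoop]
    have hjh : ¬ j ≤ h := by omega
    simp only [hjh, if_false]
    have hc : cnt k (h - j) = 0 := by
      unfold cnt; rw [if_neg (by omega)]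
    simp [hc]
  | succ d ih =>
    intro xs k c j h hj hh hd
    rw [candyALoop]
    by_cases hjh : j ≤ h
    · simp only [hjh, if_true]
      rw [candyAInner_eq]
      rw [ih xs k _ (j + 1) (h - k.toNat) (by omega) (by omega) (by omega)]
      have hjlen : j < (xs.length : Int) := by omega
      have hget : PySem.List.pyGetD xs j 0 = xs[j.toNat]'(by omega) :=
        PySem.List.pyGetD_eq_getElem xs 0 hj hjlen
      have hdrop : xs.drop j.toNat = xs[j.toNat]'(by omega) :: xs.drop (j.toNat + 1) := by
        exact (List.getElem_cons_drop (by omega)).symm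
      have hcnt : cnt k (h - j) = cnt k (h - (k.toNat : Int) - (j + 1)) + 1 := by
        rw [show h - (k.toNat : Int) - (j + 1) = (h - j) - k.toNat - 1 by ring]
        exact cnt_step k (h - j) (by omega)
      have hj1 : (j + 1).toNat = j.toNat + 1 := by omega
      rw [hcnt, hdrop, hj1, List.take_succ_cons, List.sum_cons, hget]
      ring
    · simp only [hjh, if_false]
      have hc : cnt k (h - j) = 0 := by
        unfold cnt; rw [if_neg (by omega)]
      simp [hc]

theorem candyALoop_top (xs : List Int) (k : Int) :
    candyALoop xs k 0 0 ((xs.length : Int) - 1) = (xs.take (cnt k ((xs.length : Int) - 1))).sum := by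
  rw [candyALoop_eq ((xs.length : Int) - 0 + 1).toNat xs k 0 0 ((xs.length : Int) - 1)
      (by omega) (by omega) (by omega)]
  simp

-- the closed-form pay-count of B equals A's iteration count (for 0 ≤ k)
theorem m_eq_cnt (n k : Int) (hn : 0 ≤ n) (hk : 0 ≤ k) :
    PySem.Int.floordiv (n - 1) (k + 1) + 1 = (cnt k (n - 1) : Int) := by
  unfold cnt
  rw [PySem.Int.floordiv_eq_ediv_of_pos (by omega)]
  by_cases h0 : n = 0
  · subst h0
    simp only [show ¬ (0:Int) ≤ 0 - 1 by omega, if_false]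
    have hq : (0 - 1) / (k + 1) = -1 := by
      have h1 := Int.mul_ediv_add_emod (0 - 1) (k + 1)
      have h2 := Int.emod_nonneg (0 - 1) (show (k+1) ≠ 0 by omega)
      have h3 := Int.emod_lt_of_pos (0 - 1) (show (0:Int) < k+1 by omega)
      rcases lt_trichotomy ((0 - 1) / (k + 1)) (-1) with h | h | h
      · exfalso
        have : (k + 1) * ((0 - 1) / (k + 1)) ≤ (k + 1) * (-2) :=
          mul_le_mul_of_nonneg_left (by omega) (by omega)
        nlinarith
      · exact h
      · exfalso
        have : (k + 1) * 0 ≤ (k + 1) * ((0 - 1) / (k + 1)) :=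
          mul_le_mul_of_nonneg_left (by omega) (by omega)
        nlinarith
    rw [hq]
    simp
  · have h1 : 0 ≤ n - 1 := by omega
    simp only [h1, if_true]
    have hcast : (n - 1) = ((n - 1).toNat : Int) := by omega
    have hkcast : (k + 1) = ((k.toNat + 1 : Nat) : Int) := by omega
    rw [hcast, hkcast, Int.ofNat_ediv_ofNat]
    simp

theorem take_reverse_sum (xs : List Int) (m : Nat) :
    (xs.reverse.take m).sum = (xs.drop (xs.length - m)).sum := by
  rw [List.take_reverse, List.sum_reverse]

-- ===== VERDICT (by name: the statement is the Claim_ definition above) =====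
theorem candyStore_spec : Claim_equal_candyStore := by
  intro candy N k _ hk
  unfold Spec_candyStore candyStore candyStore_alt
  simp only [PySem.List.len_eq]
  set s := PySem.List.sorted candy (fun x => x) false with hs
  have hM : PySem.Int.floordiv ((s.length : Int) - 1) (k + 1) + 1 = (cnt k ((s.length : Int) - 1) : Int) :=
    m_eq_cnt (s.length : Int) k (by omega) hk
  rw [hM]
  have hMle : cnt k ((s.length : Int) - 1) ≤ s.length := by
    unfold cnt
    split
    · have h2 : ((s.length : Int) - 1).toNat / (k.toNat + 1) ≤ ((s.length : Int) - 1).toNat :=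
        Nat.div_le_self _ _
      omega
    · omega
  rw [candyALoop_top s k]
  have h2 : candyALoop s.reverse k 0 0 ((s.reverse.length : Int) - 1)
      = (s.reverse.take (cnt k ((s.length : Int) - 1))).sum := by
    rw [candyALoop_top s.reverse k]
    simp
  rw [h2]
  rw [PySem.List.slice_to s (by omega), PySem.List.slice_from s (by omega)]
  rw [show ((cnt k ((s.length : Int) - 1) : Int)).toNat = cnt k ((s.length : Int) - 1) by omega]
  rw [show ((s.length : Int) - (cnt k ((s.length : Int) - 1) : Int)).toNat
      = s.length - cnt k ((s.length : Int) - 1) by omega]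
  rw [take_reverse_sum s _]
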